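-- pv_equiv track=rewrite | github.com/NULLCT/LOMC | src/data/1207.py | solve
-- ===== SOURCE A (Python) =====
-- def solve(N, Q, AB, CD):
--     edges = [[] for _ in range(N + 1)]
--     for a, b in AB:
--         edges[a].append(b)
--         edges[b].append(a)
--
--     depth = [None] * (N + 1)
--
--     def dfs(cur, d):
--         if depth[cur] is not None:
--             return
--         depth[cur] = d
--         for nex in edges[cur]:
--             dfs(nex, d + 1)
--
--     dfs(1, 0)
--
--     for c, d in CD:
--         if abs(depth[c] - depth[d]) % 2 == 0:
--             yield "Town"
--         else:
--             yield "Road"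
-- ===== SOURCE B (Python) =====
-- def solve(N, Q, AB, CD):
--     edges = [[] for _ in range(N + 1)]
--     for a, b in AB:
--         edges[a].append(b)
--         edges[b].append(a)
--
--     depth = [None] * (N + 1)
--     stack = [(1, 0)]
--     while stack:
--         cur, d = stack.pop()
--         if depth[cur] is not None:
--             continue
--         depth[cur] = d
--         for nex in reversed(edges[cur]):
--             stack.append((nex, d + 1))
--
--     out = []
--     for c, d in CD:
--         out.append("Town" if abs(depth[c] - depth[d]) % 2 == 0 else "Road")
--     return out
-- ===== Notes on version B (the rewrite author's own statement) =====
-- stated objective: idiomatic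
-- what changed: A's recursive dfs is replaced by an iterative DFS with an explicit worklist stack (and the generator's yields by building a result list), removing recursion entirely.
import Mathlib
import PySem

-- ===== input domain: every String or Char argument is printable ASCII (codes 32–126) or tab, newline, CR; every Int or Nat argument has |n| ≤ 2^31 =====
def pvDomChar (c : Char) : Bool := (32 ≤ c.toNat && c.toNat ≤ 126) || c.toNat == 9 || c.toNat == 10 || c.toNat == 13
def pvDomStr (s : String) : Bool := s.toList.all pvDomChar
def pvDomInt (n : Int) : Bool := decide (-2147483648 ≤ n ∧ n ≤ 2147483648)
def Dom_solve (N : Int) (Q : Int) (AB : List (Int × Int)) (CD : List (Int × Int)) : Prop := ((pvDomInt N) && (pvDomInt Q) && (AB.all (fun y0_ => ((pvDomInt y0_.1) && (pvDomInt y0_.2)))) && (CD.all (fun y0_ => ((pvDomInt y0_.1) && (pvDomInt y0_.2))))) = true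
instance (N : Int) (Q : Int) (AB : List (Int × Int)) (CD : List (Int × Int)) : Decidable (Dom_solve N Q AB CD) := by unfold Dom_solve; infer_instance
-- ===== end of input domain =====

-- B replaces A's recursive DFS by an explicit worklist stack (iterative DFS), same answers; return value only (A is a generator, B returns a list).

-- ===== PORT A =====

/-- `edges[i].append(v)` with Python indexing; where Python would raise IndexError
(impossible under `Pre_solve`) the list is left unchanged. -/
def appendAt (es : List (List Int)) (i : Int) (v : Int) : List (List Int) :=
  match PySem.List.pyGet? es i with
  | none => es
  | some l => PySem.List.pySetD es i (l ++ [v])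

/-- `edges = [[] for _ in range(N+1)]; for a, b in AB: edges[a].append(b); edges[b].append(a)`
(these lines are identical in A and in B, so both ports share this helper). -/
def buildEdges (N : Int) (AB : List (Int × Int)) : List (List Int) :=
  AB.foldl (fun es p => appendAt (appendAt es p.1 p.2) p.2 p.1)
    (List.replicate (N + 1).toNat [])

/-- The query body, identical in A and B: `"Town" if abs(depth[c] - depth[d]) % 2 == 0 else "Road"`.
Where Python raises (IndexError / TypeError on a `None` depth; excluded by `Pre_solve`) we return `""`. -/
def answer (dep : List (Option Int)) (c d : Int) : String :=
  match PySem.List.pyGet? dep c, PySem.List.pyGet? dep d with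
  | some (some x), some (some y) => if (x - y).natAbs % 2 = 0 then "Town" else "Road"
  | _, _ => ""

mutual
/-- A's recursive `dfs(cur, d)`. `fuel` only makes the recursion structural; started at the
number of cells of `depth` it never runs out, because every nested call happens after an
unvisited cell was just filled in. -/
def dfsA (E : List (List Int)) (fuel : Nat) (cur d : Int) (dep : List (Option Int)) :
    List (Option Int) :=
  match fuel with
  | 0 => dep
  | f + 1 =>
    match PySem.List.pyGet? dep cur with
    | none => dep                 -- `depth[cur]` raises IndexError (outside Pre_solve)
    | some (some _) => dep        -- `if depth[cur] is not None: return`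
    | some none =>
        dfsAFor E f (PySem.List.pyGetD E cur []) (d + 1)
          (PySem.List.pySetD dep cur (some d))   -- `depth[cur] = d`
termination_by (fuel, 0)

/-- `for nex in edges[cur]: dfs(nex, d + 1)` -/
def dfsAFor (E : List (List Int)) (fuel : Nat) (ns : List Int) (d : Int)
    (dep : List (Option Int)) : List (Option Int) :=
  match ns with
  | [] => dep
  | n :: rest => dfsAFor E fuel rest d (dfsA E fuel n d dep)
termination_by (fuel, ns.length + 1)
end

def solve (N : Int) (Q : Int) (AB : List (Int × Int)) (CD : List (Int × Int)) : List String :=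
  let E := buildEdges N AB
  let dep0 : List (Option Int) := List.replicate (N + 1).toNat none  -- depth = [None]*(N+1)
  let dep := dfsA E (N + 1).toNat 1 0 dep0                           -- dfs(1, 0)
  CD.map (fun p => answer dep p.1 p.2)                               -- the generator's yields, in order

-- ===== PORT B =====

/-- Core counting fact for `count_pySetD_lt`. -/
theorem count_set_lt (v : Int) : ∀ (l : List (Option Int)) (k : Nat), l[k]? = some none →
    (l.set k (some v)).count none < l.count none := by
  intro l
  induction l with
  | nil => intro k hk; simp at hk
  | cons x xs ih =>
    intro k hget
    cases k with
    | zero => simp_all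
    | succ k =>
      simp only [List.set_cons_succ, List.count_cons]
      have := ih k (by simpa using hget)
      omega

/-- Fact the worklist loop's termination cites: filling an unvisited cell strictly
decreases the number of `none` cells. -/
theorem count_pySetD_lt (dep : List (Option Int)) (cur : Int) (v : Int)
    (h : PySem.List.pyGet? dep cur = some none) :
    (PySem.List.pySetD dep cur (some v)).count none < dep.count none := by
  unfold PySem.List.pyGet? PySem.List.pySetD PySem.List.pySet? at *
  cases hk : PySem.List.pyIdx? dep.length cur with
  | none => rw [hk] at h; simp at h
  | some k =>
    rw [hk] at h
    simp only [Option.bind_some, Option.map_some, Option.getD_some] at h ⊢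
    exact count_set_lt v dep k h

/-- B's `while stack:` loop; the stack top is the list head. Pushing
`reversed(edges[cur])` one by one onto the Python stack puts `edges[cur]` in order
on top, i.e. prepends `edges[cur]` (paired with `d+1`) to the list. -/
def dfsB (E : List (List Int)) (stack : List (Int × Int)) (dep : List (Option Int)) :
    List (Option Int) :=
  match stack with
  | [] => dep
  | (cur, d) :: rest =>
    match h : PySem.List.pyGet? dep cur with
    | none => dfsB E rest dep              -- `depth[cur]` raises IndexError (outside Pre_solve)
    | some (some _) => dfsB E rest dep     -- `continue`
    | some none =>
        dfsB E ((PySem.List.pyGetD E cur []).map (fun n => (n, d + 1)) ++ rest)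
          (PySem.List.pySetD dep cur (some d))
termination_by (dep.count none, stack.length)
decreasing_by
  · exact Prod.Lex.right _ (Nat.lt_succ_self _)
  · exact Prod.Lex.right _ (Nat.lt_succ_self _)
  · exact Prod.Lex.left _ _ (count_pySetD_lt dep cur d h)

def solve_alt (N : Int) (Q : Int) (AB : List (Int × Int)) (CD : List (Int × Int)) : List String :=
  let E := buildEdges N AB
  let dep0 : List (Option Int) := List.replicate (N + 1).toNat none  -- depth = [None]*(N+1)
  let dep := dfsB E [(1, 0)] dep0                                    -- stack = [(1, 0)]; while stack: ...
  CD.foldl (fun out p => out ++ [answer dep p.1 p.2]) []             -- out.append(...)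

-- ===== PRECONDITION & SPEC =====

/-- Vertices connected to town 1 in the graph of `AB`, with labels normalised the way
Python's negative indexing reads them (`x % (N+1)`); `AB.length + 1` passes reach the
closure, since a pass that adds nothing has already converged. -/
def reachList (N : Int) (AB : List (Int × Int)) : List Int :=
  (fun s => AB.foldl (fun s p =>
      let a := PySem.Int.mod p.1 (N + 1)
      let b := PySem.Int.mod p.2 (N + 1)
      let s := if a ∈ s ∧ b ∉ s then s ++ [b] else s
      if b ∈ s ∧ a ∉ s then s ++ [a] else s) s)^[AB.length + 1] [1]

/-- Exactly the inputs on which the Python A returns normally: `N ≥ 1` (else `depth[1]`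
raises IndexError), every edge endpoint a valid Python index into the `N+1` buckets,
and every queried town a valid index whose vertex is connected to town 1 (an
unreached town has depth `None`, so A raises TypeError). -/
def Pre_solve (N : Int) (Q : Int) (AB : List (Int × Int)) (CD : List (Int × Int)) : Prop :=
  1 ≤ N ∧
  (∀ p ∈ AB, -(N + 1) ≤ p.1 ∧ p.1 ≤ N ∧ -(N + 1) ≤ p.2 ∧ p.2 ≤ N) ∧
  (∀ p ∈ CD, -(N + 1) ≤ p.1 ∧ p.1 ≤ N ∧ -(N + 1) ≤ p.2 ∧ p.2 ≤ N ∧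
    PySem.Int.mod p.1 (N + 1) ∈ reachList N AB ∧ PySem.Int.mod p.2 (N + 1) ∈ reachList N AB)

instance (N : Int) (Q : Int) (AB : List (Int × Int)) (CD : List (Int × Int)) :
    Decidable (Pre_solve N Q AB CD) := by unfold Pre_solve; infer_instance

def pvWitness_solve : Int × Int × (List (Int × Int)) × (List (Int × Int)) :=
  (3, 2, [(1, 2), (2, 3)], [(1, 3), (2, 3)])

def Spec_solve (N : Int) (Q : Int) (AB : List (Int × Int)) (CD : List (Int × Int)) (out : List String) : Prop := out = solve_alt N Q AB CD
instance (N : Int) (Q : Int) (AB : List (Int × Int)) (CD : List (Int × Int)) (out : List String) : Decidable (Spec_solve N Q AB CD out) := by unfold Spec_solve; infer_instance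

-- ===== CLAIM (what is proved, stated in full; the proofs are below) =====
def Claim_equal_solve : Prop := ∀ (N : Int) (Q : Int) (AB : List (Int × Int)) (CD : List (Int × Int)), Dom_solve N Q AB CD → Pre_solve N Q AB CD → Spec_solve N Q AB CD (solve N Q AB CD)

-- ===== LEMMAS AND PROOFS =====

/-- One unfolding step of the worklist loop: the popped town was already visited (or the
index is invalid), the loop just continues. -/
theorem dfsB_skip (E : List (List Int)) (cur d : Int) (rest : List (Int × Int))
    (dep : List (Option Int)) (h : PySem.List.pyGet? dep cur ≠ some none) :
    dfsB E ((cur, d) :: rest) dep = dfsB E rest dep := by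
  rw [dfsB]
  split
  · rfl
  · rfl
  · rename_i heq; exact absurd heq h

/-- One unfolding step of the worklist loop: the popped town is unvisited, it gets its
depth and its neighbours go on top of the stack. -/
theorem dfsB_visit (E : List (List Int)) (cur d : Int) (rest : List (Int × Int))
    (dep : List (Option Int)) (h : PySem.List.pyGet? dep cur = some none) :
    dfsB E ((cur, d) :: rest) dep =
      dfsB E ((PySem.List.pyGetD E cur []).map (fun n => (n, d + 1)) ++ rest)
        (PySem.List.pySetD dep cur (some d)) := by
  rw [dfsB]
  split
  · rename_i heq; rw [h] at heq; cases heq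
  · rename_i x heq; rw [h] at heq; cases heq
  · rfl

/-- Monotonicity: the recursive DFS never creates `none` cells. -/
theorem dfsA_count_le (E : List (List Int)) : ∀ f : Nat,
    (∀ cur d dep, (dfsA E f cur d dep).count none ≤ dep.count none) ∧
    (∀ ns d dep, (dfsAFor E f ns d dep).count none ≤ dep.count none) := by
  intro f
  induction f with
  | zero =>
    refine ⟨by intro cur d dep; rw [dfsA], ?_⟩
    intro ns
    induction ns with
    | nil => intro d dep; rw [dfsAFor]
    | cons n rest ih => intro d dep; rw [dfsAFor, dfsA]; exact ih d dep
  | succ f ih =>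
    have hA : ∀ cur d dep, (dfsA E (f + 1) cur d dep).count none ≤ dep.count none := by
      intro cur d dep
      rw [dfsA]
      cases h : PySem.List.pyGet? dep cur with
      | none => exact le_refl _
      | some o =>
        cases o with
        | some x => exact le_refl _
        | none => exact le_trans (ih.2 _ _ _) (le_of_lt (count_pySetD_lt dep cur d h))
    refine ⟨hA, ?_⟩
    intro ns
    induction ns with
    | nil => intro d dep; rw [dfsAFor]
    | cons n rest ihn => intro d dep; rw [dfsAFor]; exact le_trans (ihn _ _) (hA _ _ _)

/-- The worklist loop simulates the recursive DFS: processing `(cur, d)` on top of the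
stack from state `dep` lands in the state `dfs(cur, d)` reaches, provided the fuel
bounds the number of unvisited cells. -/
theorem dfsB_eq_dfsA (E : List (List Int)) : ∀ f : Nat,
    (∀ cur d dep rest, dep.count none ≤ f →
        dfsB E ((cur, d) :: rest) dep = dfsB E rest (dfsA E f cur d dep)) ∧
    (∀ ns d dep rest, dep.count none ≤ f →
        dfsB E (ns.map (fun n => (n, d)) ++ rest) dep = dfsB E rest (dfsAFor E f ns d dep)) := by
  intro f
  induction f with
  | zero =>
    have hA : ∀ cur d dep rest, dep.count none ≤ 0 →
        dfsB E ((cur, d) :: rest) dep = dfsB E rest (dfsA E 0 cur d dep) := by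
      intro cur d dep rest h0
      rw [dfsA, dfsB_skip]
      intro hc
      have hm : (none : Option Int) ∈ dep := PySem.List.mem_of_pyGet?_eq_some dep hc
      have := List.count_pos_iff.mpr hm
      omega
    refine ⟨hA, ?_⟩
    intro ns
    induction ns with
    | nil => intro d dep rest h0; rw [dfsAFor]; rfl
    | cons n rest' ih =>
      intro d dep rest h0
      rw [dfsAFor]
      have h1 := hA n d dep (rest'.map (fun n => (n, d)) ++ rest) h0
      rw [List.map_cons, List.cons_append, h1, dfsA]
      rw [dfsA] at h1
      exact ih d dep rest h0
  | succ f ih =>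
    have hA : ∀ cur d dep rest, dep.count none ≤ f + 1 →
        dfsB E ((cur, d) :: rest) dep = dfsB E rest (dfsA E (f + 1) cur d dep) := by
      intro cur d dep rest hc
      rw [dfsA]
      cases h : PySem.List.pyGet? dep cur with
      | none => rw [dfsB_skip]; simp [h]
      | some o =>
        cases o with
        | some x => rw [dfsB_skip]; simp [h]
        | none =>
          rw [dfsB_visit E cur d rest dep h]
          have hlt := count_pySetD_lt dep cur d h
          exact ih.2 (PySem.List.pyGetD E cur []) (d + 1) _ rest (by omega)
    refine ⟨hA, ?_⟩
    intro ns
    induction ns with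
    | nil => intro d dep rest hc; rw [dfsAFor]; rfl
    | cons n rest' ihn =>
      intro d dep rest hc
      rw [dfsAFor, List.map_cons, List.cons_append]
      rw [hA n d dep (rest'.map (fun n => (n, d)) ++ rest) hc]
      exact ihn d _ rest (le_trans ((dfsA_count_le E (f + 1)).1 n d dep) hc)

-- ===== VERDICT (by name: the statement is the Claim_ definition above) =====
theorem solve_spec : Claim_equal_solve := by
  intro N Q AB CD _ _
  simp only [Spec_solve, solve, solve_alt]
  have hdep : dfsA (buildEdges N AB) (N + 1).toNat 1 0 (List.replicate (N + 1).toNat none)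
      = dfsB (buildEdges N AB) [(1, 0)] (List.replicate (N + 1).toNat none) := by
    have h := (dfsB_eq_dfsA (buildEdges N AB) (N + 1).toNat).1 1 0
      (List.replicate (N + 1).toNat none) [] (by simp)
    rw [h, dfsB]
  rw [hdep]
  rw [PySem.List.foldl_append_singleton_eq_map, List.nil_append]
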